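-- pv_equiv track=rewrite | github.com/neodymium6/rust_reveri | tmp.py | get_reverse_l
-- ===== SOURCE A (Python) =====
-- def get_need_l(i, j):
--     put = 1 << (7 - j)
--     state8 = i << 1
--     if state8 & put:
--         # puting already put position
--         # not happen in game
--         return 0
--     if state8 & (put << 1) == 0:
--         # no opposite stone in left
--         return 0
--     put <<= 1
--     while state8 & put:
--         put <<= 1
--     return put
--
-- def get_reverse_l(i, j):
--     put = 1 << (7 - j)
--     state8 = i << 1
--     if get_need_l(i, j) == 0:
--         return 0
--     other = get_need_l(i, j)
--     res = 0
--     other = other >> 1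
--     while other != put:
--         res |= other
--         other = other >> 1
--     return res
-- ===== SOURCE B (Python) =====
-- def get_reverse_l(i, j):
--     put = 1 << (7 - j)
--     state8 = i << 1
--     if state8 & put:
--         return 0
--     pos = put << 1
--     if not (state8 & pos):
--         return 0
--     start = pos
--     while state8 & pos:
--         pos <<= 1
--     return pos - start
-- ===== Notes on version B (the rewrite author's own statement) =====
-- stated objective: simpler
-- what changed: B drops the get_need_l helper (which A calls twice) and A's two-phase 'find endpoint, then walk back OR-accumulating' structure; it does a single forward scan and returns the reversed mask as the closed-form difference pos - start of two powers of two.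
import Mathlib
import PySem

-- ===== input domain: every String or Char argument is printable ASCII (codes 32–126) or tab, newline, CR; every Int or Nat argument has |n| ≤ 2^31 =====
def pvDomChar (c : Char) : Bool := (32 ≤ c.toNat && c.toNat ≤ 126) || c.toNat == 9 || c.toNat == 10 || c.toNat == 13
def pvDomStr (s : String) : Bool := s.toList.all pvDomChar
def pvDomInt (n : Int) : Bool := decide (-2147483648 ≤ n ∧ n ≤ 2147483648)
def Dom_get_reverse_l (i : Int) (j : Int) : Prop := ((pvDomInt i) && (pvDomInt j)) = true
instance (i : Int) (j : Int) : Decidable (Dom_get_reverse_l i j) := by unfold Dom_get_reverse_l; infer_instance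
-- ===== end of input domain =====

-- B replaces A's two-phase endpoint-search + walk-back OR accumulation (helper called twice)
-- by a single forward scan returning the mask as the closed-form difference of two powers of two.


-- ===== PORT A =====
-- the 'while state8 & put: put <<= 1' loop of get_need_l (fuel 64 is never exhausted inside Pre_)
def needLoop (state8 : Int) (put : Int) : Nat → Int
  | 0 => put
  | n + 1 => if PySem.Int.band state8 put ≠ 0 then needLoop state8 (put <<< (1 : Nat)) n else put

def get_need_l (i : Int) (j : Int) : Int :=
  let put : Int := (1 : Int) <<< (7 - j).toNat
  let state8 : Int := i <<< (1 : Nat)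
  if PySem.Int.band state8 put ≠ 0 then 0
  else if PySem.Int.band state8 (put <<< (1 : Nat)) = 0 then 0
  else needLoop state8 (put <<< (1 : Nat)) 64

-- the 'while other != put: res |= other; other >>= 1' loop (fuel 64 is never exhausted inside Pre_)
def backLoop (put : Int) (other : Int) (res : Int) : Nat → Int
  | 0 => res
  | n + 1 =>
    if other ≠ put then backLoop put (other >>> (1 : Nat)) (PySem.Int.bor res other) n else res

def get_reverse_l (i : Int) (j : Int) : Int :=
  let put : Int := (1 : Int) <<< (7 - j).toNat
  let _state8 : Int := i <<< (1 : Nat)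
  if get_need_l i j = 0 then 0
  else backLoop put (get_need_l i j >>> (1 : Nat)) 0 64

-- ===== PORT B =====
-- the 'while state8 & pos: pos <<= 1' scan of Source B (fuel 64 is never exhausted inside Pre_)
def scanLoop (state8 : Int) : Int → Nat → Int
  | pos, 0 => pos
  | pos, n + 1 => if PySem.Int.band state8 pos ≠ 0 then scanLoop state8 (pos <<< (1 : Nat)) n else pos

def get_reverse_l_alt (i : Int) (j : Int) : Int :=
  let put : Int := (1 : Int) <<< (7 - j).toNat
  let state8 : Int := i <<< (1 : Nat)
  if PySem.Int.band state8 put ≠ 0 then 0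
  else
    let pos : Int := put <<< (1 : Nat)
    if PySem.Int.band state8 pos = 0 then 0
    else scanLoop state8 pos 64 - pos

-- ===== PRECONDITION & SPEC =====
-- Pre_ excludes j ≥ 8, where Python A raises ValueError (1 << negative), and the negative-i inputs
-- on which A's unbounded 'while state8 & put' loop never terminates; A returns on every admitted input.
def Pre_get_reverse_l (i : Int) (j : Int) : Prop :=
  j ≤ 7 ∧ ¬((i >>> (7 - j).toNat) = -1 ∧ ((2 * i) >>> (7 - j).toNat) % 2 = 0)
instance (i : Int) (j : Int) : Decidable (Pre_get_reverse_l i j) := by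
  unfold Pre_get_reverse_l; infer_instance

def pvWitness_get_reverse_l : Int × Int := (6, 0)

def Spec_get_reverse_l (i : Int) (j : Int) (out : Int) : Prop := out = get_reverse_l_alt i j
instance (i : Int) (j : Int) (out : Int) : Decidable (Spec_get_reverse_l i j out) := by
  unfold Spec_get_reverse_l; infer_instance

-- ===== CLAIM (what is proved, stated in full; the proofs are below) =====
def Claim_equal_get_reverse_l : Prop := ∀ (i : Int) (j : Int), Dom_get_reverse_l i j → Pre_get_reverse_l i j → Spec_get_reverse_l i j (get_reverse_l i j)

-- ===== LEMMAS AND PROOFS =====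

-- Python shifts on Int, arithmetically
theorem pv_shl (x : Int) (k : Nat) : x <<< k = x * 2 ^ k := by
  rw [Int.shiftLeft_eq]

theorem pv_shr (x : Int) (k : Nat) : x >>> k = x / 2 ^ k := by
  rw [Int.shiftRight_eq_div_pow]; congr 1

-- a Nat bit as a div/mod value
theorem natBit (m k : Nat) : ((m.testBit k).toNat : Nat) = m / 2 ^ k % 2 := by
  have h := Nat.testBit_div_two_pow (n := k) m 0
  rw [Nat.zero_add] at h
  rw [← h, Nat.testBit_zero]
  rcases Nat.mod_two_eq_zero_or_one (m / 2 ^ k) with h2 | h2 <;> simp [h2]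

-- floor division of -(y+1) by a power of two
theorem neg_ediv_pow (y : Nat) (k : Nat) :
    (-(y : Int) - 1) / 2 ^ k = -((y / 2 ^ k : Nat) : Int) - 1 := by
  have h2k : ((2 : Int) ^ k) ≠ 0 := by positivity
  have hrlt : y % 2 ^ k < 2 ^ k := Nat.mod_lt _ (by positivity)
  have hdecomp : y = 2 ^ k * (y / 2 ^ k) + y % 2 ^ k := (Nat.div_add_mod y (2 ^ k)).symm
  have hse : (-(y : Int) - 1) =
      ((2 : Int) ^ k - 1 - ((y % 2 ^ k : Nat) : Int)) + (-((y / 2 ^ k : Nat) : Int) - 1) * 2 ^ k := by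
    nth_rewrite 1 [hdecomp]
    push_cast
    ring
  rw [hse, Int.add_mul_ediv_right _ _ h2k,
    Int.ediv_eq_zero_of_lt (by push_cast; omega) (by push_cast; omega)]
  ring

-- masking with a single power of two reads one bit
theorem band_two_pow (s : Int) (k : Nat) :
    PySem.Int.band s ((2 : Int) ^ k) = (s >>> k) % 2 * 2 ^ k := by
  have hpk : ((2 : Int) ^ k) = ((2 ^ k : Nat) : Int) := by push_cast; ring
  rw [pv_shr]
  by_cases hs : 0 ≤ s
  · rw [PySem.Int.band_of_nonneg hs (by positivity)]
    obtain ⟨m, rfl⟩ : ∃ m : Nat, s = (m : Int) := ⟨s.toNat, (Int.toNat_of_nonneg hs).symm⟩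
    rw [hpk]
    simp only [Int.toNat_natCast]
    have key : m &&& 2 ^ k = m / 2 ^ k % 2 * 2 ^ k := by
      rw [Nat.and_two_pow, natBit]
    rw [key]
    push_cast
    ring
  · -- s < 0
    unfold PySem.Int.band
    rw [if_neg hs, if_pos (by positivity : (0 : Int) ≤ 2 ^ k)]
    set mN : Nat := (-s - 1).toNat with hmN
    have hsm : s = -(mN : Int) - 1 := by
      have : ((-s - 1).toNat : Int) = -s - 1 := Int.toNat_of_nonneg (by omega)
      omega
    have htn : ((2 : Int) ^ k).toNat = 2 ^ k := by rw [hpk]; exact Int.toNat_natCast _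
    rw [htn, Nat.two_pow_and, hsm, neg_ediv_pow]
    have hbit : ((mN.testBit k).toNat : Nat) = mN / 2 ^ k % 2 := natBit mN k
    have hq2 : mN / 2 ^ k % 2 = 0 ∨ mN / 2 ^ k % 2 = 1 := Nat.mod_two_eq_zero_or_one _
    have hmle : 2 ^ k * (mN.testBit k).toNat ≤ 2 ^ k := by
      rcases Bool.toNat_le (mN.testBit k) with h
      calc 2 ^ k * (mN.testBit k).toNat ≤ 2 ^ k * 1 := Nat.mul_le_mul_left _ h
        _ = 2 ^ k := Nat.mul_one _
    have hmodcast : ((mN / 2 ^ k % 2 : Nat) : Int) = ((mN / 2 ^ k : Nat) : Int) % 2 := by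
      push_cast; ring
    rcases hq2 with h2 | h2 <;>
      · rw [hbit, h2] at hmle ⊢
        have : (-((mN / 2 ^ k : Nat) : Int) - 1) % 2 = 1 - ((mN / 2 ^ k : Nat) : Int) % 2 := by omega
        rw [this, ← hmodcast, h2]
        push_cast [Nat.sub_le_iff_le_add]
        omega

theorem band_two_pow_eq_zero (s : Int) (k : Nat) :
    PySem.Int.band s ((2 : Int) ^ k) = 0 ↔ (s >>> k) % 2 = 0 := by
  rw [band_two_pow]
  constructor
  · intro h
    rcases mul_eq_zero.mp h with h | h
    · exact h
    · exact absurd h (by positivity)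
  · intro h; rw [h]; ring

-- OR of a block of high bits with the next bit down is addition
theorem nat_or_add (c m : Nat) : c * 2 ^ (m + 1) ||| 2 ^ m = (2 * c + 1) * 2 ^ m := by
  apply Nat.eq_of_testBit_eq
  intro i
  have h1 : c * 2 ^ (m + 1) = c <<< (m + 1) := (Nat.shiftLeft_eq _ _).symm
  have h2 : (2 * c + 1) * 2 ^ m = (2 * c + 1) <<< m := (Nat.shiftLeft_eq _ _).symm
  rw [Nat.testBit_lor, h1, h2, Nat.testBit_shiftLeft, Nat.testBit_shiftLeft, Nat.testBit_two_pow]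
  rcases lt_trichotomy i m with hc | hc | hc
  · have d1 : ¬ (i ≥ m + 1) := by omega
    have d2 : ¬ (i ≥ m) := by omega
    have d3 : m ≠ i := by omega
    simp [d1, d2, d3]
  · subst hc
    have d1 : ¬ (i ≥ i + 1) := by omega
    have d2 : (2 * c + 1) % 2 = 1 := by omega
    simp [d1, Nat.testBit_zero, d2]
  · obtain ⟨d, rfl⟩ : ∃ d, i = m + 1 + d := ⟨i - (m + 1), by omega⟩
    have d1 : m + 1 + d ≥ m + 1 := by omega
    have d2 : m + 1 + d ≥ m := by omega
    have d3 : m ≠ m + 1 + d := by omega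
    have e1 : m + 1 + d - (m + 1) = d := by omega
    have e2 : m + 1 + d - m = d + 1 := by omega
    have e3 : (2 * c + 1).testBit (d + 1) = c.testBit d := by
      rw [Nat.testBit_add_one]
      congr 1
      omega
    simp [d1, d2, d3, e1, e2, e3]

-- A's accumulation step: OR-ing in the next power of two below the block is addition
theorem bor_step (c m : Nat) :
    PySem.Int.bor ((c * 2 ^ (m + 1) : Nat) : Int) ((2 : Int) ^ m)
      = (((2 * c + 1) * 2 ^ m : Nat) : Int) := by
  have hpk : ((2 : Int) ^ m) = ((2 ^ m : Nat) : Int) := by push_cast; ring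
  rw [hpk, PySem.Int.bor_of_nonneg (by positivity) (by positivity)]
  simp only [Int.toNat_natCast]
  rw [nat_or_add]

-- the scan of B is the search loop of A's helper
theorem scan_eq_need (s : Int) : ∀ (n : Nat) (pos : Int), scanLoop s pos n = needLoop s pos n := by
  intro n
  induction n with
  | zero => intro pos; rfl
  | succ n ih =>
    intro pos
    simp only [scanLoop, needLoop]
    split
    · exact ih _
    · rfl

-- the search loop lands on the first clear bit
theorem needLoop_eq (s : Int) : ∀ (t k n : Nat), t < n →
    (s >>> (k + t)) % 2 = 0 → (∀ u, u < t → (s >>> (k + u)) % 2 = 1) →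
    needLoop s ((2 : Int) ^ k) n = 2 ^ (k + t) := by
  intro t
  induction t with
  | zero =>
    intro k n hn h0 _
    obtain ⟨n', rfl⟩ : ∃ n', n = n' + 1 := ⟨n - 1, by omega⟩
    have hb : PySem.Int.band s ((2 : Int) ^ k) = 0 :=
      (band_two_pow_eq_zero s k).mpr (by simpa using h0)
    simp only [needLoop, ne_eq, hb, not_true_eq_false, if_false]
    norm_num
  | succ t ih =>
    intro k n hn h0 hu
    obtain ⟨n', rfl⟩ : ∃ n', n = n' + 1 := ⟨n - 1, by omega⟩
    have hbit : (s >>> (k + 0)) % 2 = 1 := hu 0 (by omega)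
    rw [Nat.add_zero] at hbit
    have hband : PySem.Int.band s ((2 : Int) ^ k) ≠ 0 := by
      rw [Ne, band_two_pow_eq_zero, hbit]; omega
    simp only [needLoop, ne_eq, hband, not_false_eq_true, if_true]
    have hshl : ((2 : Int) ^ k) <<< (1 : Nat) = 2 ^ (k + 1) := by rw [pv_shl]; ring
    rw [hshl]
    have hrec := ih (k + 1) n' (by omega)
      (by rw [show k + 1 + t = k + (t + 1) by omega]; exact h0)
      (by intro u hu'; rw [show k + 1 + u = k + (u + 1) by omega]; exact hu (u + 1) (by omega))
    rw [hrec, show k + 1 + t = k + (t + 1) by omega]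

-- the walk-back accumulation produces the closed-form difference of two powers of two
theorem backLoop_eq : ∀ (t n k c : Nat), t ≤ n →
    backLoop ((2 : Int) ^ k) ((2 : Int) ^ (k + t)) ((c * 2 ^ (k + t + 1) : Nat) : Int) n =
      ((c * 2 ^ (k + t + 1) : Nat) : Int) + 2 ^ (k + t + 1) - 2 ^ (k + 1) := by
  intro t
  induction t with
  | zero =>
    intro n k c _
    rw [Nat.add_zero]
    have hres : ∀ m, backLoop ((2 : Int) ^ k) ((2 : Int) ^ k) ((c * 2 ^ (k + 1) : Nat) : Int) m
        = ((c * 2 ^ (k + 1) : Nat) : Int) := by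
      intro m
      cases m with
      | zero => rfl
      | succ m => simp only [backLoop, ne_eq, not_true_eq_false, if_false]
    rw [hres]; ring
  | succ t ih =>
    intro n k c hn
    obtain ⟨n', rfl⟩ : ∃ n', n = n' + 1 := ⟨n - 1, by omega⟩
    have hne : ((2 : Int) ^ (k + (t + 1))) ≠ 2 ^ k := by
      have : (2 : Int) ^ k < 2 ^ (k + (t + 1)) :=
        pow_lt_pow_right₀ (by norm_num) (by omega)
      omega
    simp only [backLoop, ne_eq, hne, not_false_eq_true, if_true]
    have hshr : ((2 : Int) ^ (k + (t + 1))) >>> (1 : Nat) = 2 ^ (k + t) := by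
      rw [pv_shr, pow_one, show k + (t + 1) = (k + t) + 1 by omega, pow_succ,
        Int.mul_ediv_cancel _ (by norm_num)]
    have hbor : PySem.Int.bor ((c * 2 ^ (k + (t + 1) + 1) : Nat) : Int) ((2 : Int) ^ (k + (t + 1)))
        = (((2 * c + 1) * 2 ^ (k + t + 1) : Nat) : Int) := by
      have := bor_step c (k + t + 1)
      rw [show k + (t + 1) + 1 = k + t + 1 + 1 by omega, show k + (t + 1) = k + t + 1 by omega]
      exact this
    rw [hshr, hbor, ih n' k (2 * c + 1) (by omega)]
    push_cast
    ring

-- inside Pre_ and Dom_, some bit of state8 above the adjacent opponent stone is clear, within fuel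
theorem exists_clear_bit (i : Int) (e : Nat)
    (hlo : -2147483648 ≤ i) (hhi : i ≤ 2147483648)
    (hg2 : ((2 * i) >>> (e + 1)) % 2 = 1)
    (hpre : i >>> e ≠ -1) :
    ∃ t, t < 64 ∧ ((2 * i) >>> (e + 1 + t)) % 2 = 0 := by
  by_cases hi : 0 ≤ i
  · -- nonnegative: above bit 32 everything is clear
    have h33 : (2 : Int) ^ 33 = 8589934592 := by norm_num
    have hle : (2 : Int) ^ (e + 1) ≤ 2 * i := by
      rcases le_or_gt ((2 : Int) ^ (e + 1)) (2 * i) with h | h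
      · exact h
      · exfalso
        have h0 : (2 * i) / 2 ^ (e + 1) = 0 := Int.ediv_eq_zero_of_lt (by omega) h
        rw [pv_shr, h0] at hg2
        norm_num at hg2
    have he32 : e + 1 ≤ 32 := by
      by_contra hgt
      have hmono : (2 : Int) ^ 33 ≤ 2 ^ (e + 1) :=
        pow_le_pow_right₀ (by norm_num) (by omega)
      omega
    refine ⟨32 - e, by omega, ?_⟩
    rw [pv_shr, show e + 1 + (32 - e) = 33 by omega,
      Int.ediv_eq_zero_of_lt (by omega) (by omega)]
    norm_num
  · -- negative: Pre_ gives a clear bit of i at or above e, and it lies below bit 31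
    have hi' : i < 0 := by omega
    have h31 : (2 : Int) ^ 31 = 2147483648 := by norm_num
    have hxfact : i >>> e = i / 2 ^ e := pv_shr i e
    set x : Int := i / 2 ^ e with hx
    have hone : (1 : Int) ≤ 2 ^ e := one_le_pow₀ (by norm_num)
    have hm1 : (-1 : Int) / 2 ^ e = -1 := by
      have := neg_ediv_pow 0 e
      simpa using this
    have hxneg : x ≤ -1 := by
      rw [hx, ← hm1]
      exact Int.ediv_le_ediv (by positivity) (by omega)
    have hxlo : -2147483648 ≤ x := by
      rw [hx, Int.le_ediv_iff_mul_le (by positivity)]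
      nlinarith
    have hxne : x ≠ -1 := fun h => hpre (by rw [hxfact, h])
    have hchain : ∀ b : Nat, (2 * i) >>> (e + 1 + b) = x / 2 ^ b := by
      intro b
      rw [pv_shr, hx, show (2 : Int) ^ (e + 1 + b) = 2 * (2 ^ e * 2 ^ b) by
          rw [pow_add, pow_add, pow_one]; ring,
        Int.mul_ediv_mul_of_pos _ _ (by norm_num),
        ← Int.ediv_ediv_of_nonneg (by positivity)]
    clear_value x
    set y : Nat := (-x - 1).toNat with hy
    have hxy : x = -(y : Int) - 1 := by omega
    have hylt : y < 2 ^ 31 := by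
      have hc : ((2 ^ 31 : Nat) : Int) = 2147483648 := by norm_num
      omega
    have hyne : y ≠ 0 := by omega
    have hbit : ∃ b, b < 31 ∧ y.testBit b = true := by
      by_contra hno
      apply hyne
      apply Nat.eq_of_testBit_eq
      intro b
      simp only [Nat.zero_testBit]
      by_cases hb : b < 31
      · rcases hB : y.testBit b with _ | _
        · rfl
        · exact absurd ⟨b, hb, hB⟩ hno
      · exact Nat.testBit_lt_two_pow
          (lt_of_lt_of_le hylt (Nat.pow_le_pow_right (by norm_num) (by omega)))
    obtain ⟨b, hb31, hbtrue⟩ := hbit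
    refine ⟨b, by omega, ?_⟩
    have hq1 : y / 2 ^ b % 2 = 1 := by
      have hnb := natBit y b
      rw [hbtrue] at hnb
      simpa using hnb.symm
    rw [hchain b, hxy, neg_ediv_pow]
    generalize hgq : y / 2 ^ b = q at hq1 ⊢
    omega

-- Dom_ unpacked
theorem dom_bounds (i j : Int) (h : Dom_get_reverse_l i j) :
    -2147483648 ≤ i ∧ i ≤ 2147483648 := by
  unfold Dom_get_reverse_l pvDomInt at h
  simp only [Bool.and_eq_true, decide_eq_true_eq] at h
  exact h.1

-- ===== VERDICT (by name: the statement is the Claim_ definition above) =====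
theorem get_reverse_l_spec : Claim_equal_get_reverse_l := by
  intro i j hDom hPre
  unfold Pre_get_reverse_l at hPre
  set e : Nat := (7 - j).toNat with he
  have h1s : (1 : Int) <<< e = 2 ^ e := by rw [pv_shl]; ring
  have hstate : i <<< (1 : Nat) = 2 * i := by rw [pv_shl]; ring
  have hput1 : ((2 : Int) ^ e) <<< (1 : Nat) = 2 ^ (e + 1) := by rw [pv_shl]; ring
  have hneedform : get_need_l i j =
      (if PySem.Int.band (2 * i) ((2 : Int) ^ e) ≠ 0 then 0
       else if PySem.Int.band (2 * i) ((2 : Int) ^ (e + 1)) = 0 then 0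
       else needLoop (2 * i) ((2 : Int) ^ (e + 1)) 64) := by
    simp only [get_need_l]
    rw [← he, h1s, hstate, hput1]
  have hAform : get_reverse_l i j =
      (if get_need_l i j = 0 then 0
       else backLoop ((2 : Int) ^ e) (get_need_l i j >>> (1 : Nat)) 0 64) := by
    simp only [get_reverse_l]
    rw [← he, h1s]
  have hBform : get_reverse_l_alt i j =
      (if PySem.Int.band (2 * i) ((2 : Int) ^ e) ≠ 0 then 0
       else if PySem.Int.band (2 * i) ((2 : Int) ^ (e + 1)) = 0 then 0
       else scanLoop (2 * i) ((2 : Int) ^ (e + 1)) 64 - 2 ^ (e + 1)) := by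
    simp only [get_reverse_l_alt]
    rw [← he, h1s, hstate, hput1]
  unfold Spec_get_reverse_l
  rw [hAform, hBform, hneedform]
  by_cases hb1 : PySem.Int.band (2 * i) ((2 : Int) ^ e) = 0
  · by_cases hb2 : PySem.Int.band (2 * i) ((2 : Int) ^ (e + 1)) = 0
    · simp [hb1, hb2]
    · -- main case: both guards pass
      obtain ⟨hdlo, hdhi⟩ := dom_bounds i j hDom
      have hg1 : ((2 * i) >>> e) % 2 = 0 := (band_two_pow_eq_zero _ _).mp hb1
      have hg2 : ((2 * i) >>> (e + 1)) % 2 = 1 := by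
        have hne2 : ¬ ((2 * i) >>> (e + 1)) % 2 = 0 :=
          fun h => hb2 ((band_two_pow_eq_zero _ _).mpr h)
        omega
      have hpre2 : i >>> e ≠ -1 := fun hx => hPre.2 ⟨hx, hg1⟩
      obtain ⟨tw, htw64, htw0⟩ := exists_clear_bit i e hdlo hdhi hg2 hpre2
      have hex : ∃ t, ((2 * i) >>> (e + 1 + t)) % 2 = 0 := ⟨tw, htw0⟩
      have htl0 : ((2 * i) >>> (e + 1 + Nat.find hex)) % 2 = 0 := Nat.find_spec hex
      have htlmin : ∀ u, u < Nat.find hex → ((2 * i) >>> (e + 1 + u)) % 2 = 1 := by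
        intro u hu
        have := Nat.find_min hex hu
        omega
      have htl64 : Nat.find hex < 64 := lt_of_le_of_lt (Nat.find_min' hex htw0) htw64
      have hneed : needLoop (2 * i) ((2 : Int) ^ (e + 1)) 64 = 2 ^ (e + 1 + Nat.find hex) :=
        needLoop_eq (2 * i) (Nat.find hex) (e + 1) 64 (by omega) htl0 htlmin
      have hscan : scanLoop (2 * i) ((2 : Int) ^ (e + 1)) 64 = 2 ^ (e + 1 + Nat.find hex) := by
        rw [scan_eq_need]; exact hneed
      have hneedval :
          (if PySem.Int.band (2 * i) ((2 : Int) ^ e) ≠ 0 then 0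
           else if PySem.Int.band (2 * i) ((2 : Int) ^ (e + 1)) = 0 then 0
           else needLoop (2 * i) ((2 : Int) ^ (e + 1)) 64) = 2 ^ (e + 1 + Nat.find hex) := by
        rw [if_neg (not_not_intro hb1), if_neg hb2, hneed]
      rw [hneedval, if_neg (not_not_intro hb1), if_neg hb2, hscan,
        if_neg (by positivity : ¬ ((2 : Int) ^ (e + 1 + Nat.find hex)) = 0)]
      have hshr : ((2 : Int) ^ (e + 1 + Nat.find hex)) >>> (1 : Nat) = 2 ^ (e + Nat.find hex) := by
        rw [pv_shr, pow_one, show e + 1 + Nat.find hex = (e + Nat.find hex) + 1 by omega, pow_succ,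
          Int.mul_ediv_cancel _ (by norm_num)]
      rw [hshr]
      have hback := backLoop_eq (Nat.find hex) 64 e 0 (by omega)
      rw [Nat.zero_mul, Nat.cast_zero] at hback
      rw [hback, show e + Nat.find hex + 1 = e + 1 + Nat.find hex by omega]
      ring
  · -- first guard fires: A's helper returns 0 and B returns 0
    simp [hb1]
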